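-- pv_equiv track=rewrite | github.com/ricemaster1/bad-apple-asm | analyze_masks.py | best_horizontal_shift
-- ===== SOURCE A (Python) =====
-- from typing import Set, Tuple
--
-- def best_horizontal_shift(prev_set: Set[int], cur_set: Set[int], w: int, max_shift: int = 32) -> Tuple[int, int]:
--     # Returns (best_dx, best_overlap)
--     best_dx = 0
--     best_overlap = 0
--     # Precompute prev per-row sets for quick shifting
--     prev_rows = {}
--     for idx in prev_set:
--         y = idx // w
--         x = idx % w
--         prev_rows.setdefault(y, set()).add(x)
--     cur_rows = {}
--     for idx in cur_set:
--         y = idx // w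
--         x = idx % w
--         cur_rows.setdefault(y, set()).add(x)
--
--     for dx in range(-max_shift, max_shift + 1):
--         overlap = 0
--         for y, cur_xs in cur_rows.items():
--             prev_xs = prev_rows.get(y)
--             if not prev_xs:
--                 continue
--             # shift cur_xs by -dx to align with prev
--             shifted = {x - dx for x in cur_xs if 0 <= x - dx < w}
--             overlap += len(shifted & prev_xs)
--         if overlap > best_overlap:
--             best_overlap = overlap
--             best_dx = dx
--     return best_dx, best_overlap
-- ===== SOURCE B (Python) =====
-- from typing import Set, Tuple
--
-- def best_horizontal_shift(prev_set: Set[int], cur_set: Set[int], w: int, max_shift: int = 32) -> Tuple[int, int]: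
--     # Returns (best_dx, best_overlap)
--     # One pass over cur_set: histogram hist[d] = number of pixels c whose row-mate
--     # c-d lies in prev_set (with the shifted column 0 <= c%w - d < w), for d in
--     # [-max_shift, max_shift]; then pick the first dx with a strictly larger count.
--     hist = {}
--     for c in cur_set:
--         cx = c % w
--         lo = max(-max_shift, cx - w + 1)   # 0 <= cx - d < w  <=>  cx-w+1 <= d <= cx
--         hi = min(max_shift, cx)
--         for d in range(lo, hi + 1):
--             if c - d in prev_set:
--                 hist[d] = hist.get(d, 0) + 1
--     best_dx = 0
--     best_overlap = 0
--     for dx in range(-max_shift, max_shift + 1):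
--         o = hist.get(dx, 0)
--         if o > best_overlap:
--             best_dx = dx
--             best_overlap = o
--     return best_dx, best_overlap
-- ===== Notes on version B (the rewrite author's own statement) =====
-- stated objective: faster
-- what changed: Instead of re-scanning cur_set for every candidate shift (building a shifted set and intersecting it per row, per dx), B makes one pass over cur_set filling a histogram hist[d] of viable shifts via direct membership tests in prev_set, then scans dx ascending for the first strict maximum. Pre_ excludes w = 0 (A raises ZeroDivisionError) and cur_set lists with duplicate elements, which do not encode a Python set (the declared argument type) and on which A's set-based dedup and B's per-element count legitimately disagree.
import Mathlib
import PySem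

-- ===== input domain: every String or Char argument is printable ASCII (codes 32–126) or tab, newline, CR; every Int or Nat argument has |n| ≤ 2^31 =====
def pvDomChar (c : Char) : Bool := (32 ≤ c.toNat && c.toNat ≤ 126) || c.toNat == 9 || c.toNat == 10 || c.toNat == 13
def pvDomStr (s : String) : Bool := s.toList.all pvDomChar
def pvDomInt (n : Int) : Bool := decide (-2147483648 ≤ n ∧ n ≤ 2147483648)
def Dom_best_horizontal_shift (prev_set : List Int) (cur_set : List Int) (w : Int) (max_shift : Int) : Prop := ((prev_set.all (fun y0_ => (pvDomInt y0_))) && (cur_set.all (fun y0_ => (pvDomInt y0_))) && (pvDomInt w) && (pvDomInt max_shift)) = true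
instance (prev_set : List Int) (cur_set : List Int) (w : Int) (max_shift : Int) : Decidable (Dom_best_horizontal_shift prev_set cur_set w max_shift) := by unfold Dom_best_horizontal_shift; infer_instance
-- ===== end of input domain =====

-- B replaces A's per-shift per-row shifted-set intersections by a single pass over cur_set that
-- builds a histogram of viable shifts; equivalence is about the return value (Python set/dict
-- iteration orders do not affect it, so both ports iterate the given lists in order).

-- ===== PORT A =====
-- rows dict: `rows.setdefault(y, set()).add(x)` ported as insert-in-place of the grown set
def pvRowsA (l : List Int) (w : Int) : PySem.Dict Int (PySem.Set Int) :=
  l.foldl (fun d idx =>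
    let y := PySem.Int.floordiv idx w
    let x := PySem.Int.mod idx w
    d.insert y (PySem.Set.add (d.getD y PySem.Set.empty) x)) PySem.Dict.empty

-- the inner `for y, cur_xs in cur_rows.items(): …` loop computing `overlap` for one dx
def pvOverlapA (prevRows : PySem.Dict Int (PySem.Set Int)) (curItems : List (Int × PySem.Set Int))
    (w dx : Int) : Int :=
  curItems.foldl (fun ov item =>
    match prevRows.get? item.1 with
    | none => ov                                  -- prev_xs is None: `if not prev_xs: continue`
    | some prev_xs =>
      if prev_xs.isEmpty then ov                  -- `if not prev_xs: continue` (empty set)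
      else
        let shifted : PySem.Set Int :=
          PySem.Set.ofList (((item.2 : List Int).filter
            (fun x => decide (0 ≤ x - dx) && decide (x - dx < w))).map (fun x => x - dx))
        ov + PySem.Set.len (PySem.Set.inter shifted prev_xs)) 0

def best_horizontal_shift (prev_set : List Int) (cur_set : List Int) (w : Int) (max_shift : Int) : Int × Int :=
  let prevRows := pvRowsA prev_set w
  let curRows := pvRowsA cur_set w
  (PySem.List.pyRange (-max_shift) (max_shift + 1)).foldl
    (fun best dx =>
      let overlap := pvOverlapA prevRows curRows.items w dx
      if best.2 < overlap then (dx, overlap) else best)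
    (0, 0)

-- ===== PORT B =====
-- histogram: hist[d] += 1 for every c in cur_set and d in [lo c, hi c] with (c - d) ∈ prev_set
def pvHistB (prev_set : List Int) (cur_set : List Int) (w : Int) (max_shift : Int) : PySem.Dict Int Int :=
  cur_set.foldl (fun h c =>
    let cx := PySem.Int.mod c w
    let lo := max (-max_shift) (cx - w + 1)
    let hi := min max_shift cx
    (PySem.List.pyRange lo (hi + 1)).foldl (fun h d =>
      if prev_set.contains (c - d) then h.insert d (h.getD d 0 + 1) else h) h)
    PySem.Dict.empty

def best_horizontal_shift_alt (prev_set : List Int) (cur_set : List Int) (w : Int) (max_shift : Int) : Int × Int :=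
  let hist := pvHistB prev_set cur_set w max_shift
  (PySem.List.pyRange (-max_shift) (max_shift + 1)).foldl
    (fun best dx =>
      let o := hist.getD dx 0
      if best.2 < o then (dx, o) else best)
    (0, 0)

-- ===== PRECONDITION & SPEC =====
-- w = 0 raises ZeroDivisionError in A; cur_set.Nodup excludes lists with duplicate elements,
-- which do not encode a Python set (the declared argument type, whose List encoding holds
-- distinct elements) and on which A's set-based dedup and B's per-element count legitimately disagree.
def Pre_best_horizontal_shift (prev_set : List Int) (cur_set : List Int) (w : Int) (max_shift : Int) : Prop :=
  w ≠ 0 ∧ cur_set.Nodup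
instance (prev_set : List Int) (cur_set : List Int) (w : Int) (max_shift : Int) : Decidable (Pre_best_horizontal_shift prev_set cur_set w max_shift) := by unfold Pre_best_horizontal_shift; infer_instance

def pvWitness_best_horizontal_shift : List Int × List Int × Int × Int := ([0, 1, 5], [1, 2, 6], 4, 2)

def Spec_best_horizontal_shift (prev_set : List Int) (cur_set : List Int) (w : Int) (max_shift : Int) (out : Int × Int) : Prop := out = best_horizontal_shift_alt prev_set cur_set w max_shift
instance (prev_set : List Int) (cur_set : List Int) (w : Int) (max_shift : Int) (out : Int × Int) : Decidable (Spec_best_horizontal_shift prev_set cur_set w max_shift out) := by unfold Spec_best_horizontal_shift; infer_instance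

-- ===== CLAIM (what is proved, stated in full; the proofs are below) =====
def Claim_equal_best_horizontal_shift : Prop := ∀ (prev_set : List Int) (cur_set : List Int) (w : Int) (max_shift : Int), Dom_best_horizontal_shift prev_set cur_set w max_shift → Pre_best_horizontal_shift prev_set cur_set w max_shift → Spec_best_horizontal_shift prev_set cur_set w max_shift (best_horizontal_shift prev_set cur_set w max_shift)

-- ===== LEMMAS AND PROOFS =====

def pvCond (prev_set : List Int) (w dx c : Int) : Bool :=
  decide (0 ≤ PySem.Int.mod c w - dx) && decide (PySem.Int.mod c w - dx < w) && prev_set.contains (c - dx)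

theorem pvHist_inner (prev_set : List Int) (c : Int) (rng : List Int) (h : PySem.Dict Int Int) (dx : Int) :
    ((rng.foldl (fun h d => if prev_set.contains (c - d) then h.insert d (h.getD d 0 + 1) else h) h).getD dx 0)
      = h.getD dx 0 + (if prev_set.contains (c - dx) then (rng.count dx : Int) else 0) := by
  induction rng generalizing h with
  | nil => simp
  | cons d rest ih =>
    simp only [List.foldl_cons, ih]
    by_cases hd : d = dx
    · subst hd
      by_cases hc : (c - d) ∈ prev_set
      · simp [hc]; ring
      · simp [hc]
    · by_cases hc : (c - d) ∈ prev_set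
      · simp [hc, PySem.Dict.getD_insert, Ne.symm hd, hd]
      · simp [hc, hd]

theorem pvCount_pyRange (b x : Int) : ∀ (n : Nat) (a : Int), (b - a).toNat = n →
    (PySem.List.pyRange a b).count x = if a ≤ x ∧ x < b then 1 else 0 := by
  intro n
  induction n with
  | zero =>
    intro a ha
    rw [PySem.List.pyRange_one_eq_nil (by omega)]
    simp; omega
  | succ m ih =>
    intro a ha
    rw [PySem.List.pyRange_one_cons (by omega), List.count_cons, ih (a + 1) (by omega)]
    by_cases hx : x = a
    · subst hx; simp; omega
    · simp [Ne.symm hx]; split_ifs <;> omega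


theorem pvHist_getD (prev_set cur_set : List Int) (w max_shift dx : Int)
    (h1 : -max_shift ≤ dx) (h2 : dx ≤ max_shift) :
    (pvHistB prev_set cur_set w max_shift).getD dx 0 = (cur_set.countP (pvCond prev_set w dx) : Int) := by
  have key : ∀ (l : List Int) (h : PySem.Dict Int Int),
      ((l.foldl (fun h c =>
        (PySem.List.pyRange (max (-max_shift) (PySem.Int.mod c w - w + 1)) (min max_shift (PySem.Int.mod c w) + 1)).foldl
          (fun h d => if prev_set.contains (c - d) then h.insert d (h.getD d 0 + 1) else h) h) h).getD dx 0)
        = h.getD dx 0 + (l.countP (pvCond prev_set w dx) : Int) := by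
    intro l
    induction l with
    | nil => simp
    | cons c rest ih =>
      intro h
      simp only [List.foldl_cons]
      rw [ih, pvHist_inner, pvCount_pyRange _ _ _ _ rfl, List.countP_cons]
      by_cases hc : (c - dx) ∈ prev_set
      · simp only [pvCond]
        split_ifs with hr hb hb <;> simp_all <;> try omega
      · simp [pvCond, hc]
  unfold pvHistB
  rw [key cur_set PySem.Dict.empty, PySem.Dict.getD_empty]
  ring

theorem pvRowsA_mem (l : List Int) (w y x : Int) :
    x ∈ (pvRowsA l w).getD y PySem.Set.empty ↔ ∃ c ∈ l, PySem.Int.floordiv c w = y ∧ PySem.Int.mod c w = x := by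
  have key : ∀ (l : List Int) (d : PySem.Dict Int (PySem.Set Int)),
      (x ∈ (l.foldl (fun d idx =>
          d.insert (PySem.Int.floordiv idx w)
            (PySem.Set.add (d.getD (PySem.Int.floordiv idx w) PySem.Set.empty) (PySem.Int.mod idx w))) d).getD y PySem.Set.empty
        ↔ x ∈ d.getD y PySem.Set.empty ∨ ∃ c ∈ l, PySem.Int.floordiv c w = y ∧ PySem.Int.mod c w = x) := by
    intro l
    induction l with
    | nil => simp
    | cons c rest ih =>
      intro d
      simp only [List.foldl_cons, ih, PySem.Dict.getD_insert, List.mem_cons]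
      split_ifs with hy
      · subst hy
        simp only [PySem.Set.mem_add]
        constructor
        · rintro ((h | h) | ⟨a, ha, h1, h2⟩)
          · exact Or.inl h
          · exact Or.inr ⟨c, Or.inl rfl, rfl, h.symm⟩
          · exact Or.inr ⟨a, Or.inr ha, h1, h2⟩
        · rintro (h | ⟨a, (rfl | ha), h1, h2⟩)
          · exact Or.inl (Or.inl h)
          · rw [← h1]
            exact Or.inl (Or.inr h2.symm)
          · exact Or.inr ⟨a, ha, h1, h2⟩
      · constructor
        · rintro (h | ⟨a, ha, h1, h2⟩)
          · exact Or.inl h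
          · exact Or.inr ⟨a, Or.inr ha, h1, h2⟩
        · rintro (h | ⟨a, (rfl | ha), h1, h2⟩)
          · exact Or.inl h
          · exact absurd h1 (fun hh => hy hh.symm)
          · exact Or.inr ⟨a, ha, h1, h2⟩
  rw [pvRowsA, key l PySem.Dict.empty]
  simp


theorem pvRowsA_nodup (l : List Int) (w y : Int) :
    ((pvRowsA l w).getD y PySem.Set.empty).Nodup := by
  have key : ∀ (l : List Int) (d : PySem.Dict Int (PySem.Set Int)),
      (∀ z, (d.getD z PySem.Set.empty).Nodup) →
      ∀ z, ((l.foldl (fun d idx =>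
          d.insert (PySem.Int.floordiv idx w)
            (PySem.Set.add (d.getD (PySem.Int.floordiv idx w) PySem.Set.empty) (PySem.Int.mod idx w))) d).getD z PySem.Set.empty).Nodup := by
    intro l
    induction l with
    | nil => exact fun d h z => h z
    | cons c rest ih =>
      intro d hd z
      simp only [List.foldl_cons]
      refine ih _ ?_ z
      intro z'
      rw [PySem.Dict.getD_insert]
      split_ifs with h
      · exact PySem.Set.nodup_add _ _ (hd _)
      · exact hd z'
  rw [pvRowsA]
  refine key l PySem.Dict.empty (fun z => ?_) y
  rw [PySem.Dict.getD_empty]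
  exact List.nodup_nil

-- per-item contribution of A's inner loop, as a function
def pvG (prevRows : PySem.Dict Int (PySem.Set Int)) (w dx : Int) (item : Int × PySem.Set Int) : Int :=
  match prevRows.get? item.1 with
  | none => 0
  | some prev_xs =>
    if prev_xs.isEmpty then 0
    else
      PySem.Set.len (PySem.Set.inter
        (PySem.Set.ofList (((item.2 : List Int).filter
          (fun x => decide (0 ≤ x - dx) && decide (x - dx < w))).map (fun x => x - dx))) prev_xs)

theorem pvOverlapA_eq_sum (prevRows : PySem.Dict Int (PySem.Set Int)) (curItems : List (Int × PySem.Set Int))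
    (w dx : Int) : pvOverlapA prevRows curItems w dx = (curItems.map (pvG prevRows w dx)).sum := by
  unfold pvOverlapA
  rw [PySem.List.foldl_congr_mem _ _ (fun ov item => ov + pvG prevRows w dx item) 0 ?_,
      PySem.List.foldl_add]
  · simp
  · intro acc item _
    unfold pvG
    rcases h : prevRows.get? item.1 with _ | s
    · simp [h]
    · by_cases hs : s.isEmpty <;> simp [h, hs]

-- the set-intersection length A computes for one row is a countP over that row's set
theorem pvContrib (xs s : List Int) (hxs : xs.Nodup) (w dx : Int) :
    PySem.Set.len (PySem.Set.inter
      (PySem.Set.ofList ((xs.filter (fun x => decide (0 ≤ x - dx) && decide (x - dx < w))).map (fun x => x - dx))) s)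
    = (xs.countP (fun x => decide (0 ≤ x - dx) && decide (x - dx < w) && s.contains (x - dx)) : Int) := by
  have hnd : ((xs.filter (fun x => decide (0 ≤ x - dx) && decide (x - dx < w))).map (fun x => x - dx)).Nodup := by
    refine List.Nodup.map_on ?_ (hxs.filter _)
    intro a _ b _ hab
    omega
  rw [PySem.Set.ofList_eq_self_of_nodup _ hnd, PySem.Set.inter.eq_1, PySem.Set.len_eq]
  congr 1
  rw [← List.countP_eq_length_filter, List.countP_map, List.countP_filter]
  refine List.countP_congr ?_
  intro a _
  simp [PySem.Set.contains, Function.comp]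
  tauto

def pvQ (prev_set : List Int) (w dx y x : Int) : Bool :=
  decide (0 ≤ x - dx) && decide (x - dx < w) &&
    ((pvRowsA prev_set w).getD y PySem.Set.empty).contains (x - dx)

theorem pvMemRow_iff (prev_set : List Int) (w dx y c : Int)
    (hy : PySem.Int.floordiv c w = y)
    (hb1 : 0 ≤ PySem.Int.mod c w - dx) (hb2 : PySem.Int.mod c w - dx < w) :
    ((PySem.Int.mod c w - dx) ∈ (pvRowsA prev_set w).getD y PySem.Set.empty ↔ (c - dx) ∈ prev_set) := by
  have hc : y * w + PySem.Int.mod c w = c := by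
    have h := PySem.Int.floordiv_mul_add_mod c w
    rw [hy] at h
    omega
  have hw : 0 < w := by omega
  rw [pvRowsA_mem]
  constructor
  · rintro ⟨p, hp, hfd, hmd⟩
    have h := PySem.Int.floordiv_mul_add_mod p w
    rw [hfd] at h
    have : p = c - dx := by omega
    rwa [this] at hp
  · intro hp
    have h1 : PySem.Int.floordiv (c - dx) w = y := by
      rw [PySem.Int.floordiv_eq_iff_of_pos hw]
      constructor <;> nlinarith
    have h2 := PySem.Int.floordiv_mul_add_mod (c - dx) w
    rw [h1] at h2
    exact ⟨c - dx, hp, h1, by omega⟩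

theorem pvRowCount (prev_set cur_set : List Int) (w dx y : Int) (hnd : cur_set.Nodup) :
    ((pvRowsA cur_set w).getD y PySem.Set.empty).countP (pvQ prev_set w dx y)
      = cur_set.countP (fun c => pvCond prev_set w dx c && (PySem.Int.floordiv c w == y)) := by
  have hL : (cur_set.filter (fun c => PySem.Int.floordiv c w == y)).Nodup := hnd.filter _
  have hmap : ((cur_set.filter (fun c => PySem.Int.floordiv c w == y)).map (fun c => PySem.Int.mod c w)).Nodup := by
    refine List.Nodup.map_on ?_ hL
    intro a ha b hb hab
    have hya : PySem.Int.floordiv a w = y := by simpa using List.of_mem_filter ha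
    have hyb : PySem.Int.floordiv b w = y := by simpa using List.of_mem_filter hb
    have h1 := PySem.Int.floordiv_mul_add_mod a w
    have h2 := PySem.Int.floordiv_mul_add_mod b w
    rw [hya] at h1; rw [hyb] at h2
    omega
  have hperm : ((pvRowsA cur_set w).getD y PySem.Set.empty).Perm
      ((cur_set.filter (fun c => PySem.Int.floordiv c w == y)).map (fun c => PySem.Int.mod c w)) := by
    rw [List.perm_ext_iff_of_nodup (pvRowsA_nodup _ _ _) hmap]
    intro x
    rw [pvRowsA_mem]
    simp only [List.mem_map, List.mem_filter, beq_iff_eq]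
    constructor
    · rintro ⟨c, hc, h1, h2⟩; exact ⟨c, ⟨hc, h1⟩, h2⟩
    · rintro ⟨c, ⟨hc, h1⟩, h2⟩; exact ⟨c, hc, h1, h2⟩
  rw [hperm.countP_eq, List.countP_map, List.countP_filter]
  refine List.countP_congr ?_
  intro c _
  simp only [Function.comp]
  by_cases hy : PySem.Int.floordiv c w = y
  · simp only [hy, beq_self_eq_true, Bool.and_true]
    unfold pvQ pvCond
    by_cases hb1 : (0 ≤ PySem.Int.mod c w - dx)
    · by_cases hb2 : (PySem.Int.mod c w - dx < w)
      · simp only [hb1, hb2, decide_true, Bool.true_and]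
        have := pvMemRow_iff prev_set w dx y c hy hb1 hb2
        rw [List.contains_iff_mem]
        simpa using this
      · simp only [hb2, decide_false, Bool.and_false, Bool.false_and]
    · simp only [hb1, decide_false, Bool.false_and]
  · simp [hy]

theorem pvPartition (K : List Int) (hK : K.Nodup) (key : Int → Int) (cond : Int → Bool) :
    ∀ (l : List Int), (∀ c ∈ l, key c ∈ K) →
    (K.map (fun y => (l.countP (fun c => cond c && (key c == y)) : Int))).sum = (l.countP cond : Int) := by
  intro l
  induction l with
  | nil => simp
  | cons c rest ih =>
    intro hcov
    have hc : key c ∈ K := hcov c (List.mem_cons_self)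
    have hrest := ih (fun a ha => hcov a (List.mem_cons_of_mem _ ha))
    simp only [List.countP_cons]
    have split : (K.map (fun y => ((rest.countP (fun a => cond a && (key a == y))
          + if (cond c && (key c == y)) then 1 else 0 : Nat) : Int))).sum
        = (K.map (fun y => (rest.countP (fun a => cond a && (key a == y)) : Int))).sum
          + (K.map (fun y => ((if (cond c && (key c == y)) then 1 else 0 : Nat) : Int))).sum := by
      rw [← List.sum_map_add]
      refine congrArg _ (List.map_congr_left ?_)
      intro y _
      push_cast
      ring
    rw [split, hrest]
    have single : (K.map (fun y => ((if (cond c && (key c == y)) then 1 else 0 : Nat) : Int))).sum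
        = (if cond c then 1 else 0 : Int) := by
      by_cases hcc : cond c
      · simp only [hcc, Bool.true_and]
        have : (K.map (fun y => ((if (key c == y) then 1 else 0 : Nat) : Int))).sum
            = (K.countP (fun y => key c == y) : Int) := by
          rw [← PySem.List.sum_map_ite_one_zero (fun y => key c == y) K]
          refine congrArg _ (List.map_congr_left ?_)
          intro y _
          split_ifs <;> simp
        rw [this]
        have : K.countP (fun y => key c == y) = K.count (key c) := by
          rw [List.count]
          refine List.countP_congr ?_
          intro a _
          simp only [beq_iff_eq]
          exact eq_comm
        rw [this, List.count_eq_one_of_mem hK hc]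
        simp
      · simp [hcc]
    rw [single]
    push_cast
    ring

theorem pvG_eq (prev_set cur_set : List Int) (w dx y : Int) :
    pvG (pvRowsA prev_set w) w dx (y, (pvRowsA cur_set w).getD y PySem.Set.empty)
      = (((pvRowsA cur_set w).getD y PySem.Set.empty).countP (pvQ prev_set w dx y) : Int) := by
  unfold pvG pvQ
  rcases h : (pvRowsA prev_set w).get? y with _ | s
  all_goals dsimp only
  · have hD : (pvRowsA prev_set w).getD y PySem.Set.empty = PySem.Set.empty :=
      PySem.Dict.getD_of_get?_eq_none _ _ h
    rw [hD]
    simp [PySem.Set.empty]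
  · have hD : (pvRowsA prev_set w).getD y PySem.Set.empty = s :=
      PySem.Dict.getD_of_get?_eq_some _ _ h
    rw [hD]
    by_cases hs : s.isEmpty
    · have hnil : s = [] := List.isEmpty_iff.mp hs
      subst hnil
      simp
    · rw [if_neg hs]
      exact pvContrib _ s (pvRowsA_nodup cur_set w y) w dx

theorem pvOverlapA_eq (prev_set cur_set : List Int) (w dx : Int) (hnd : cur_set.Nodup) :
    pvOverlapA (pvRowsA prev_set w) (pvRowsA cur_set w).items w dx
      = (cur_set.countP (pvCond prev_set w dx) : Int) := by
  have hknd : (pvRowsA cur_set w).keys.Nodup := by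
    rw [pvRowsA]
    exact PySem.Dict.nodup_keys_foldl_insert_key cur_set (fun c => PySem.Int.floordiv c w) _ _
      PySem.Dict.nodup_keys_empty
  have hkeys : (pvRowsA cur_set w).keys
      = PySem.Set.ofList (cur_set.map (fun c => PySem.Int.floordiv c w)) := by
    rw [pvRowsA, PySem.Dict.keys_foldl_insert_key cur_set (fun c => PySem.Int.floordiv c w) _ PySem.Dict.empty]
    rw [PySem.Dict.keys_empty, PySem.Set.update_nil_left]
  have hcov : ∀ c ∈ cur_set, PySem.Int.floordiv c w ∈ (pvRowsA cur_set w).keys := by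
    intro c hc
    rw [hkeys, PySem.Set.mem_ofList]
    exact List.mem_map_of_mem hc
  rw [pvOverlapA_eq_sum, PySem.Dict.items_eq_map_keys _ hknd PySem.Set.empty, List.map_map]
  have hmap : (List.map (pvG (pvRowsA prev_set w) w dx ∘ fun k => (k, (pvRowsA cur_set w).getD k PySem.Set.empty)) (pvRowsA cur_set w).keys)
      = (pvRowsA cur_set w).keys.map (fun y =>
          (cur_set.countP (fun c => pvCond prev_set w dx c && (PySem.Int.floordiv c w == y)) : Int)) := by
    refine List.map_congr_left ?_
    intro y _
    rw [Function.comp_apply, pvG_eq, pvRowCount prev_set cur_set w dx y hnd]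
  rw [hmap]
  exact pvPartition _ hknd _ _ cur_set hcov


-- ===== VERDICT (by name: the statement is the Claim_ definition above) =====
theorem best_horizontal_shift_spec : Claim_equal_best_horizontal_shift := by
  intro prev_set cur_set w max_shift _hdom hpre
  unfold Spec_best_horizontal_shift best_horizontal_shift best_horizontal_shift_alt
  refine PySem.List.foldl_congr_mem _ _ _ _ ?_
  intro acc dx hdx
  rw [PySem.List.mem_pyRange_one] at hdx
  rw [pvOverlapA_eq prev_set cur_set w dx hpre.2,
      pvHist_getD prev_set cur_set w max_shift dx (by omega) (by omega)]
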